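-- pv_equiv track=rewrite | github.com/krokodylix/Fugue-hash | main.py | initialState384and512
-- ===== SOURCE A (Python) =====
-- def hexToDec(input):
--     dividedVector=[]
--     temp=[]
--     for i in range (0,len(input),2):
--         tempstr=str(input[i])+str(input[i+1])
--         temp.append(tempstr)
--         if i % 8==6:
--             dividedVector.append(temp)
--             temp=[]
--
--     for i in range (0, len(dividedVector)):
--         for j in range (0,len(dividedVector[0])):
--             dividedVector[i][j]=int(dividedVector[i][j],base=16)
--
--     return dividedVector
--
-- def transposeMatrix(m):
--     m2=[]
--
--     for i in range (0,len(m[0])):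
--         tab=[]
--         for j in range (0,len(m)):
--             tab.append(m[j][i])
--         m2.append(tab)
--
--     return m2
--
-- def initialState384and512(iv):
--     m=[]
--     for i in range (0,36):
--         m.append([0]*4)
--
--     deciv=hexToDec(iv)
--     for i in range (0,len(deciv)):
--         m[len(m)-1-i]=deciv[len(deciv)-1-i]
--
--     return transposeMatrix(m)
-- ===== SOURCE B (Python) =====
-- def initialState384and512(iv):
--     k = len(iv) // 8
--     rows = [[int(iv[8 * g + 2 * j : 8 * g + 2 * j + 2], 16) for j in range(4)]
--             for g in range(k)]
--     tail = rows[max(0, k - 36):]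
--     return [[0] * (36 - len(tail)) + [row[j] for row in tail] for j in range(4)]
-- ===== Notes on version B (the rewrite author's own statement) =====
-- stated objective: simpler
-- what changed: Replaces A's pair-accumulate/flush loop, the mutated 36x4 matrix and the explicit transpose with a direct construction of the transposed output: the IV is read in complete 8-char groups and each of the 4 output rows is a zero prefix plus the corresponding byte of each of the last 36 groups.
-- intended difference: On IVs with 37..72 complete 8-char groups (296..583 chars) whose overflow groups do not all coincide in value with the group 36 places (144 byte pairs) later, A's negative indices wrap around so early groups silently overwrite bottom rows of the fixed 4x36 state mixing old and new groups out of order, while B keeps the 4x36 state bottom-aligned with the last 36 groups in order (the oldest overflow groups fall off the top), the intended placement without wraparound overwrites. — e.g. on initialState384and512("0000000000000000000000000000000000000000000000000000000000000000000000000000000000000000000000000000000000000000000000…): A returns [[0, 0, 0, 0, 0, 0, 0, 0, 0, 0, 0, 0, 0, 0, 0, 0, 0, 0, 0, 0, 0, 0, 0, 0, 0, 0, 0, 0, 0, 0, 0, 0, 0, 0, 0, 0], [0, 0, 0…, B returns [[0, 0, 0, 0, 0, 0, 0, 0, 0, 0, 0, 0, 0, 0, 0, 0, 0, 0, 0, 0,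 0, 0, 0, 0, 0, 0, 0, 0, 0, 0, 0, 0, 0, 0, 0, 0], [0, 0, 0…
import Mathlib
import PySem

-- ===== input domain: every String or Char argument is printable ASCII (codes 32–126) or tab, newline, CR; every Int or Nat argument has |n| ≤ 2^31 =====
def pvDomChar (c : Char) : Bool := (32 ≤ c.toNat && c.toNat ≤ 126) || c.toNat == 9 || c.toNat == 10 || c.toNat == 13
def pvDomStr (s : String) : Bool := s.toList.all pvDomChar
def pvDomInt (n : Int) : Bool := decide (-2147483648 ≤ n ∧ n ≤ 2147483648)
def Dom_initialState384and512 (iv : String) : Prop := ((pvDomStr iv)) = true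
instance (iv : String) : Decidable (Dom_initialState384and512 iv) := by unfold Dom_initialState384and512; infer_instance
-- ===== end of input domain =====

-- B replaces A's pair/flush loop, mutated 36×4 matrix and explicit transpose by a direct
-- construction of the transposed 4×36 output from the last 36 complete 8-char groups
-- (objective: simpler); on IVs of 37..72 groups B keeps the last 36 groups in order
-- instead of A's wraparound overwrites (see D_ below).

-- ===== PORT A =====
-- int(s, base=16): PySem.Int.ofCharsBase? is exact; ValueError (none) is excluded by Pre_,
-- so the total .getD 0 form is used.
def pvHexToDec (input : List Char) : List (List Int) :=
  -- first loop over range(0, len(input), 2); state = (dividedVector, temp);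
  -- input[i], input[i+1] raise IndexError only on odd length, excluded by Pre_ (total pyGetD form)
  let st := (PySem.List.pyRange 0 (PySem.List.len input) 2).foldl
    (fun (st : List (List (List Char)) × List (List Char)) i =>
      let tempstr := [PySem.List.pyGetD input i ' ', PySem.List.pyGetD input (i + 1) ' ']
      let temp := st.2 ++ [tempstr]
      if PySem.Int.mod i 8 = 6 then (st.1 ++ [temp], []) else (st.1, temp))
    ([], [])
  -- second double loop converts every entry in place: dividedVector[i][j] = int(dividedVector[i][j], 16)
  st.1.map (fun row => row.map (fun s => (PySem.Int.ofCharsBase? s 16).getD 0))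

def pvTransposeMatrix (m : List (List Int)) : List (List Int) :=
  (PySem.List.pyRange 0 (PySem.List.len (PySem.List.pyGetD m 0 [])) 1).foldl
    (fun m2 i =>
      m2 ++ [(PySem.List.pyRange 0 (PySem.List.len m) 1).foldl
        (fun tab j => tab ++ [PySem.List.pyGetD (PySem.List.pyGetD m j []) i 0]) []])
    []

def initialState384and512 (iv : String) : List (List Int) :=
  let m0 := (PySem.List.pyRange 0 36 1).foldl (fun m _ => m ++ [List.replicate 4 (0 : Int)]) []
  let deciv := pvHexToDec iv.toList
  -- m[len(m)-1-i] = deciv[len(deciv)-1-i]: pySetD/pyGetD wrap negative indices exactly like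
  -- Python; the IndexError case (≥ 73 groups) is excluded by Pre_
  let m := (PySem.List.pyRange 0 (PySem.List.len deciv) 1).foldl
    (fun m i => PySem.List.pySetD m (PySem.List.len m - 1 - i)
      (PySem.List.pyGetD deciv (PySem.List.len deciv - 1 - i) []))
    m0
  pvTransposeMatrix m

-- ===== PORT B =====
def initialState384and512_alt (iv : String) : List (List Int) :=
  let cs := iv.toList
  let k := cs.length / 8
  -- rows = [[int(iv[8g+2j : 8g+2j+2], 16) for j in range(4)] for g in range(k)]
  let rows := (List.range k).map (fun g =>
    (List.range 4).map (fun j =>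
      (PySem.Int.ofCharsBase?
        (PySem.List.slice cs (some ((8 * g + 2 * j : Nat) : Int)) (some ((8 * g + 2 * j + 2 : Nat) : Int)))
        16).getD 0))
  -- tail = rows[max(0, k-36):]  (Nat subtraction k - 36 = max(0, k-36))
  let tail := rows.drop (k - 36)
  -- [[0]*(36-len(tail)) + [row[j] for row in tail] for j in range(4)]
  (List.range 4).map (fun j =>
    List.replicate (36 - tail.length) (0 : Int) ++ tail.map (fun row => PySem.List.pyGetD row ((j : Nat) : Int) 0))

-- ===== PRECONDITION & SPEC =====
-- Pre_ admits exactly the inputs where A returns: even length (else IndexError building the last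
-- pair), at most 72 complete 8-char groups (else IndexError from a negative index below -36),
-- and every byte pair of a complete group accepted by int(·, 16) (else ValueError).
def Pre_initialState384and512 (iv : String) : Prop :=
  iv.toList.length % 2 = 0 ∧ iv.toList.length / 8 ≤ 72 ∧
    ∀ p ∈ List.range (4 * (iv.toList.length / 8)),
      (PySem.Int.ofCharsBase? [iv.toList.getD (2 * p) ' ', iv.toList.getD (2 * p + 1) ' '] 16).isSome = true
instance (iv : String) : Decidable (Pre_initialState384and512 iv) := by
  unfold Pre_initialState384and512; infer_instance
def pvWitness_initialState384and512 : String := "0011223344556677"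

-- On IVs with 37..72 complete 8-char groups (296..583 chars) whose overflow groups do not all
-- coincide in value with the group 36 places (144 byte pairs) later, A's negative indices wrap
-- around, so early groups silently overwrite bottom rows of the fixed 4×36 state and the result
-- mixes old and new groups out of order, while B keeps the 4×36 state bottom-aligned with the
-- LAST 36 groups in order (the oldest overflow groups fall off the top) — the intended placement
-- without wraparound overwrites.
def D_initialState384and512 (iv : String) : Prop :=
  37 ≤ iv.toList.length / 8 ∧ iv.toList.length / 8 ≤ 72 ∧
    ∃ p ∈ List.range (4 * (iv.toList.length / 8 - 36)),
      PySem.Int.ofCharsBase? [iv.toList.getD (2 * p) ' ', iv.toList.getD (2 * p + 1) ' '] 16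
        ≠ PySem.Int.ofCharsBase? [iv.toList.getD (2 * (p + 144)) ' ', iv.toList.getD (2 * (p + 144) + 1) ' '] 16
instance (iv : String) : Decidable (D_initialState384and512 iv) := by
  unfold D_initialState384and512; infer_instance

def Spec_initialState384and512 (iv : String) (out : List (List Int)) : Prop :=
  ¬ D_initialState384and512 iv → out = initialState384and512_alt iv
instance (iv : String) (out : List (List Int)) : Decidable (Spec_initialState384and512 iv out) := by
  unfold Spec_initialState384and512; infer_instance

def pvDiffWitness_initialState384and512 : String := "000000000000000000000000000000000000000000000000000000000000000000000000000000000000000000000000000000000000000000000000000000000000000000000000000000000000000000000000000000000000000000000000000000000000000000000000000000000000000000000000000000000000000000000000000000000000000000000000000000ff"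
def pvDiffWitnessOut_initialState384and512 : (List (List Int)) × (List (List Int)) :=
  ([[0, 0, 0, 0, 0, 0, 0, 0, 0, 0, 0, 0, 0, 0, 0, 0, 0, 0, 0, 0, 0, 0, 0, 0, 0, 0, 0, 0, 0, 0, 0, 0, 0, 0, 0, 0], [0, 0, 0, 0, 0, 0, 0, 0, 0, 0, 0, 0, 0, 0, 0, 0, 0, 0, 0, 0, 0, 0, 0, 0, 0, 0, 0, 0, 0, 0, 0, 0, 0, 0, 0, 0], [0, 0, 0, 0, 0, 0, 0, 0, 0, 0, 0, 0, 0, 0, 0, 0, 0, 0, 0, 0, 0, 0, 0, 0, 0, 0, 0, 0, 0, 0, 0, 0, 0, 0, 0, 0], [0, 0, 0, 0, 0, 0, 0, 0, 0, 0, 0, 0, 0, 0, 0, 0, 0, 0, 0, 0, 0, 0, 0, 0, 0, 0, 0, 0, 0, 0, 0, 0, 0, 0, 0, 0]],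
   [[0, 0, 0, 0, 0, 0, 0, 0, 0, 0, 0, 0, 0, 0, 0, 0, 0, 0, 0, 0, 0, 0, 0, 0, 0, 0, 0, 0, 0, 0, 0, 0, 0, 0, 0, 0], [0, 0, 0, 0, 0, 0, 0, 0, 0, 0, 0, 0, 0, 0, 0, 0, 0, 0, 0, 0, 0, 0, 0, 0, 0, 0, 0, 0, 0, 0, 0, 0, 0, 0, 0, 0], [0, 0, 0, 0, 0, 0, 0, 0, 0, 0, 0, 0, 0, 0, 0, 0, 0, 0, 0, 0, 0, 0, 0, 0, 0, 0, 0, 0, 0, 0, 0, 0, 0, 0, 0, 0], [0, 0, 0, 0, 0, 0, 0, 0, 0, 0, 0, 0, 0, 0, 0, 0, 0, 0, 0, 0, 0, 0, 0, 0, 0, 0, 0, 0, 0, 0, 0, 0, 0, 0, 0, 255]])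

-- ===== CLAIM (what is proved, stated in full; the proofs are below) =====
def Claim_unchanged_initialState384and512 : Prop := ∀ (iv : String), Dom_initialState384and512 iv → Pre_initialState384and512 iv → Spec_initialState384and512 iv (initialState384and512 iv)
def Claim_changed_initialState384and512 : Prop := Dom_initialState384and512 (pvDiffWitness_initialState384and512) ∧ Pre_initialState384and512 (pvDiffWitness_initialState384and512) ∧ D_initialState384and512 (pvDiffWitness_initialState384and512) ∧ initialState384and512 (pvDiffWitness_initialState384and512) = pvDiffWitnessOut_initialState384and512.1 ∧ initialState384and512_alt (pvDiffWitness_initialState384and512) = pvDiffWitnessOut_initialState384and512.2 ∧ pvDiffWitnessOut_initialState384and512.1 ≠ pvDiffWitnessOut_initialState384and512.2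
def Claim_exact_initialState384and512 : Prop := ∀ (iv : String), Dom_initialState384and512 iv → Pre_initialState384and512 iv → D_initialState384and512 iv → initialState384and512 iv ≠ initialState384and512_alt iv

-- ===== LEMMAS AND PROOFS =====

def pvPair (cs : List Char) (p : Nat) : List Char := [cs.getD (2*p) ' ', cs.getD (2*p+1) ' ']

def pvVal (cs : List Char) (p : Nat) : Int := (PySem.Int.ofCharsBase? (pvPair cs p) 16).getD 0

def pvDV (cs : List Char) (t : Nat) : List (List (List Char)) :=
  (List.range (t/4)).map (fun g => (List.range 4).map (fun j => pvPair cs (4*g+j)))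

def pvTempS (cs : List Char) (t : Nat) : List (List Char) :=
  (List.range (t%4)).map (fun j => pvPair cs (4*(t/4)+j))

def pvRowsS (cs : List Char) (k : Nat) : List (List Int) :=
  (List.range k).map (fun g => (List.range 4).map (fun j => pvVal cs (4*g+j)))

lemma pvRange2_eq (t : Nat) :
    PySem.List.pyRange 0 (↑(2*t)) 2 = (List.range t).map (fun k => ((2*k : Nat) : Int)) := by
  rw [PySem.List.pyRange_of_pos _ _ (by norm_num : (0:Int) < 2)]
  rcases Nat.eq_zero_or_pos t with h | h
  · subst h; simp
  · rw [if_pos (by push_cast; omega)]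
    have h2 : ((((2*t : Nat) : Int) - 0 + 2 - 1) / 2).toNat = t := by
      have h3 : (((2*t : Nat) : Int) - 0 + 2 - 1) = 2*t + 1 := by push_cast; ring
      rw [h3]; omega
    rw [h2]
    apply List.map_congr_left; intro k _; push_cast; ring

lemma pvRange2_succ (t : Nat) :
    PySem.List.pyRange 0 (↑(2*(t+1))) 2 = PySem.List.pyRange 0 (↑(2*t)) 2 ++ [((2*t : Nat) : Int)] := by
  rw [pvRange2_eq, pvRange2_eq, List.range_succ, List.map_append]; simp

lemma pvDV_succ_flush (cs : List Char) (t : Nat) (h3 : t % 4 = 3) :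
    pvDV cs (t+1) = pvDV cs t ++ [pvTempS cs t ++ [pvPair cs t]] := by
  obtain ⟨q, rfl⟩ : ∃ q, t = 4*q+3 := ⟨t/4, by omega⟩
  have hd1 : (4*q+3+1)/4 = q+1 := by omega
  have hd2 : (4*q+3)/4 = q := by omega
  have hm2 : (4*q+3) % 4 = 3 := by omega
  simp only [pvDV, pvTempS, hd1, hd2, hm2, List.range_succ, List.map_append, List.map_singleton]

lemma pvTempS_succ_flush (cs : List Char) (t : Nat) (h3 : t % 4 = 3) :
    pvTempS cs (t+1) = [] := by
  have : (t+1) % 4 = 0 := by omega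
  simp [pvTempS, this]

lemma pvDV_succ_no (cs : List Char) (t : Nat) (h3 : t % 4 ≠ 3) :
    pvDV cs (t+1) = pvDV cs t := by
  have : (t+1)/4 = t/4 := by omega
  simp [pvDV, this]

lemma pvTempS_succ_no (cs : List Char) (t : Nat) (h3 : t % 4 ≠ 3) :
    pvTempS cs (t+1) = pvTempS cs t ++ [pvPair cs t] := by
  have hm : (t+1) % 4 = t % 4 + 1 := by omega
  have hd : (t+1)/4 = t/4 := by omega
  rw [pvTempS, hm, hd, List.range_succ, List.map_append, List.map_singleton, pvTempS]
  rw [Nat.div_add_mod t 4]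

lemma pvLoop1 (cs : List Char) (t : Nat) :
    (PySem.List.pyRange 0 (↑(2*t)) 2).foldl
      (fun (st : List (List (List Char)) × List (List Char)) i =>
        let tempstr := [PySem.List.pyGetD cs i ' ', PySem.List.pyGetD cs (i + 1) ' ']
        let temp := st.2 ++ [tempstr]
        if PySem.Int.mod i 8 = 6 then (st.1 ++ [temp], []) else (st.1, temp))
      ([], []) = (pvDV cs t, pvTempS cs t) := by
  induction t with
  | zero => simp [pvDV, pvTempS, PySem.List.pyRange_of_pos]
  | succ t ih =>
    rw [pvRange2_succ, List.foldl_append, ih]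
    simp only [List.foldl_cons, List.foldl_nil]
    have hmod : PySem.Int.mod ((2*t : Nat) : Int) 8 = (((2*t) % 8 : Nat) : Int) := by
      exact_mod_cast PySem.Int.mod_natCast (2*t) 8
    have hget1 : PySem.List.pyGetD cs ((2*t : Nat) : Int) ' ' = cs.getD (2*t) ' ' :=
      PySem.List.pyGetD_natCast cs (2*t) ' '
    have hcast : ((2*t : Nat) : Int) + 1 = ((2*t+1 : Nat) : Int) := by push_cast; ring
    have hget2 : PySem.List.pyGetD cs (((2*t : Nat) : Int) + 1) ' ' = cs.getD (2*t+1) ' ' := by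
      rw [hcast]; exact PySem.List.pyGetD_natCast cs (2*t+1) ' '
    rw [hmod]
    by_cases h3 : t % 4 = 3
    · rw [if_pos (by omega : (((2*t) % 8 : Nat) : Int) = 6)]
      rw [hget1, hget2, pvDV_succ_flush cs t h3, pvTempS_succ_flush cs t h3]
      rfl
    · rw [if_neg (by omega : ¬ (((2*t) % 8 : Nat) : Int) = 6)]
      rw [hget1, hget2, pvDV_succ_no cs t h3, pvTempS_succ_no cs t h3]
      rfl

lemma pvHexToDec_eq (cs : List Char) (heven : cs.length % 2 = 0) :
    pvHexToDec cs = pvRowsS cs (cs.length / 8) := by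
  have hb : PySem.List.len cs = ((2 * (cs.length / 2) : Nat) : Int) := by
    simp [PySem.List.len_eq]; omega
  unfold pvHexToDec
  rw [hb, pvLoop1 cs (cs.length / 2)]
  have hk : (cs.length / 2) / 4 = cs.length / 8 := by omega
  simp [pvDV, pvRowsS, hk, List.map_map, Function.comp, pvVal]

lemma pvM0_eq :
    (PySem.List.pyRange 0 36 1).foldl (fun m _ => m ++ [List.replicate 4 (0 : Int)]) []
      = List.replicate 36 (List.replicate 4 (0 : Int)) := by decide

lemma pvTake2 (cs : List Char) (a : Nat) (h : a + 1 < cs.length) :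
    (cs.drop a).take 2 = [cs.getD a ' ', cs.getD (a+1) ' '] := by
  have h1 := (List.getElem_cons_drop (show a < cs.length by omega)).symm
  have h2 := (List.getElem_cons_drop (show a + 1 < cs.length from h)).symm
  rw [h1, h2, List.take_succ_cons, List.take_succ_cons, List.take_zero,
      List.getD_eq_getElem _ _ (show a < cs.length by omega), List.getD_eq_getElem _ _ h]

lemma pvGetDmapRange4 (f : Nat → Int) (j : Nat) (hj : j < 4) :
    ((List.range 4).map f).getD j 0 = f j := by
  rw [List.getD_eq_getElem _ _ (by simpa using hj)]
  simp

lemma pvUpdate (dv : List (List Int)) (hk : dv.length ≤ 36) (j : Nat) (hj : j ≤ dv.length) :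
    (PySem.List.pyRange 0 (↑j) 1).foldl
      (fun m i => PySem.List.pySetD m (PySem.List.len m - 1 - i)
        (PySem.List.pyGetD dv (PySem.List.len dv - 1 - i) []))
      (List.replicate 36 (List.replicate 4 (0 : Int)))
    = List.replicate (36-j) (List.replicate 4 (0 : Int)) ++ dv.drop (dv.length - j) := by
  induction j with
  | zero =>
    simp [PySem.List.pyRange_one_eq_nil, List.drop_length]
  | succ j ih =>
    have hj' : j ≤ dv.length := by omega
    have hcast : ((j+1 : Nat) : Int) = (j : Int) + 1 := by push_cast; ring
    rw [hcast, PySem.List.pyRange_one_succ_right (by positivity), List.foldl_append, ih hj']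
    simp only [List.foldl_cons, List.foldl_nil]
    set z : List Int := List.replicate 4 (0 : Int)
    have hmlen : (List.replicate (36-j) z ++ dv.drop (dv.length - j)).length = 36 := by
      simp; omega
    have hlen2 : PySem.List.len (List.replicate (36-j) z ++ dv.drop (dv.length - j)) = (36 : Int) := by
      rw [PySem.List.len_eq, hmlen]; rfl
    rw [hlen2, PySem.List.len_eq]
    have hidx : (36 : Int) - 1 - (j : Int) = ((35 - j : Nat) : Int) := by push_cast; omega
    have hidx2 : ((dv.length : Nat) : Int) - 1 - (j : Int) = ((dv.length - 1 - j : Nat) : Int) := by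
      omega
    rw [hidx, hidx2, PySem.List.pySetD_natCast, PySem.List.pyGetD_natCast]
    have hjlt : j < dv.length := by omega
    have hrep : List.replicate (36-j) z = List.replicate (35-j) z ++ [z] := by
      rw [show 36-j = (35-j)+1 by omega, List.replicate_succ']
    rw [hrep, List.append_assoc,
        List.set_append_right _ _ (by simp),
        List.singleton_append,
        show (35 - j) - (List.replicate (35-j) z).length = 0 by simp,
        List.set_cons_zero]
    have hgd : dv.getD (dv.length - 1 - j) [] = dv[dv.length - 1 - j]'(by omega) :=
      List.getD_eq_getElem _ _ (by omega)
    rw [hgd]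
    have hdrop : dv[dv.length - 1 - j]'(by omega) :: dv.drop (dv.length - j) = dv.drop (dv.length - (j+1)) := by
      have := List.getElem_cons_drop (show dv.length - 1 - j < dv.length by omega) (as := dv)
      rw [show dv.length - 1 - j + 1 = dv.length - j by omega] at this
      rw [this]
      congr 1
      omega
    rw [hdrop, show 35 - j = 36 - (j+1) by omega]

lemma pvUpdateFull (dv : List (List Int)) (hk : dv.length ≤ 36) :
    (PySem.List.pyRange 0 (PySem.List.len dv) 1).foldl
      (fun m i => PySem.List.pySetD m (PySem.List.len m - 1 - i)
        (PySem.List.pyGetD dv (PySem.List.len dv - 1 - i) []))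
      (List.replicate 36 (List.replicate 4 (0 : Int)))
    = List.replicate (36 - dv.length) (List.replicate 4 (0 : Int)) ++ dv := by
  have h := pvUpdate dv hk dv.length le_rfl
  rw [PySem.List.len_eq] at h ⊢
  rw [h, Nat.sub_self, List.drop_zero]

lemma pvTranspose_eq (m : List (List Int)) (h0 : (PySem.List.pyGetD m 0 []).length = 4) :
    pvTransposeMatrix m
      = (PySem.List.pyRange 0 4 1).map (fun i => m.map (fun row => PySem.List.pyGetD row i 0)) := by
  unfold pvTransposeMatrix
  have hb : PySem.List.len (PySem.List.pyGetD m 0 []) = (4 : Int) := by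
    rw [PySem.List.len_eq, h0]; rfl
  rw [hb, PySem.List.foldl_append_singleton_eq_map
        (f := fun i => (PySem.List.pyRange 0 (PySem.List.len m) 1).foldl
          (fun tab j => tab ++ [PySem.List.pyGetD (PySem.List.pyGetD m j []) i 0]) [])]
  rw [List.nil_append]
  apply List.map_congr_left
  intro i _
  rw [PySem.List.foldl_append_singleton_eq_map
        (f := fun j => PySem.List.pyGetD (PySem.List.pyGetD m j []) i 0), List.nil_append]
  have : (fun j => PySem.List.pyGetD (PySem.List.pyGetD m j []) i 0)
       = (fun row => PySem.List.pyGetD row i 0) ∘ (fun j => PySem.List.pyGetD m j []) := rfl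
  rw [this, ← List.map_map, PySem.List.map_pyGetD_pyRange_zero]

lemma pvAlt_eq (iv : String) (hk36 : iv.toList.length / 8 ≤ 36) :
    initialState384and512_alt iv
      = (List.range 4).map (fun j =>
          List.replicate (36 - iv.toList.length / 8) (0 : Int)
            ++ (List.range (iv.toList.length / 8)).map (fun g => pvVal iv.toList (4*g+j))) := by
  unfold initialState384and512_alt
  have hdrop : (iv.toList.length / 8) - 36 = 0 := by omega
  simp only [hdrop, List.drop_zero]
  apply List.map_congr_left
  intro j hj
  have hj4 : j < 4 := by simpa using hj
  have hlen : ((List.range (iv.toList.length / 8)).map (fun g =>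
      (List.range 4).map (fun j =>
        (PySem.Int.ofCharsBase?
          (PySem.List.slice iv.toList (some ((8 * g + 2 * j : Nat) : Int)) (some ((8 * g + 2 * j + 2 : Nat) : Int)))
          16).getD 0))).length = iv.toList.length / 8 := by
    simp
  rw [hlen]
  congr 1
  rw [List.map_map]
  apply List.map_congr_left
  intro g hg
  have hgk : g < iv.toList.length / 8 := by simpa using hg
  have hrange : 8 * g + 2 * j + 1 < iv.toList.length := by
    omega
  simp only [Function.comp]
  rw [PySem.List.pyGetD_natCast]
  rw [pvGetDmapRange4 _ j hj4]
  rw [PySem.List.slice_natCast,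
      show (8*g+2*j+2) - (8*g+2*j) = 2 by omega,
      pvTake2 _ _ hrange,
      show 8*g+2*j = 2*(4*g+j) from by ring]
  rfl

lemma pvCol (cs : List Char) (k : Nat) (jn : Nat) (hj : jn < 4) :
    (List.replicate (36-k) (List.replicate 4 (0:Int)) ++ pvRowsS cs k).map
        (fun row => PySem.List.pyGetD row ((jn : Nat) : Int) 0)
      = List.replicate (36-k) (0:Int) ++ (List.range k).map (fun g => pvVal cs (4*g+jn)) := by
  rw [List.map_append, List.map_replicate]
  congr 1
  · rw [PySem.List.pyGetD_natCast]
    congr 1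
    rw [List.getD_eq_getElem _ _ (by simpa using hj)]
    exact List.getElem_replicate ..
  · unfold pvRowsS
    rw [List.map_map]
    apply List.map_congr_left
    intro g _
    simp only [Function.comp]
    rw [PySem.List.pyGetD_natCast, pvGetDmapRange4 _ jn hj]

lemma pvGetDmapRange {α : Type} (f : Nat → α) (d : α) (n j : Nat) (hj : j < n) :
    ((List.range n).map f).getD j d = f j := by
  rw [List.getD_eq_getElem _ _ (by simpa using hj)]
  simp

lemma pvSliceVal (cs : List Char) (g j : Nat) (h : 8*g+2*j+1 < cs.length) :
    (PySem.Int.ofCharsBase?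
        (PySem.List.slice cs (some ((8 * g + 2 * j : Nat) : Int)) (some ((8 * g + 2 * j + 2 : Nat) : Int)))
        16).getD 0 = pvVal cs (4*g+j) := by
  rw [PySem.List.slice_natCast,
      show (8*g+2*j+2) - (8*g+2*j) = 2 by omega,
      pvTake2 _ _ h,
      show 8*g+2*j = 2*(4*g+j) from by ring]
  rfl

lemma pvRowsS_getD (cs : List Char) (k a : Nat) (ha : a < k) :
    (pvRowsS cs k).getD a [] = (List.range 4).map (fun j => pvVal cs (4*a+j)) := by
  unfold pvRowsS
  rw [List.getD_eq_getElem _ _ (by simpa using ha)]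
  simp

lemma pvSetD_neg {α : Type} (xs : List α) (k : Nat) (v : α) (h1 : 0 < k) (h2 : k ≤ xs.length) :
    PySem.List.pySetD xs (-(k:Int)) v = xs.set (xs.length - k) v := by
  unfold PySem.List.pySetD PySem.List.pySet? PySem.List.pyIdx?
  rw [if_neg (by omega), if_pos (by omega)]
  simp

lemma pvSetMapRange {α : Type} (f : Nat → α) (n i : Nat) (v : α) :
    ((List.range n).map f).set i v
      = (List.range n).map (fun p => if p = i then v else f p) := by
  apply List.ext_getElem (by simp)
  intro m h1 h2
  simp only [List.getElem_set, List.getElem_map, List.getElem_range]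
  split_ifs with h h' <;> first | rfl | omega

lemma pvWrapLoop (dv : List (List Int)) (kk : Nat)
    (h37 : 37 ≤ kk) (h72 : kk ≤ 72) (j : Nat) (hj : j ≤ kk) :
    (PySem.List.pyRange 0 (↑j) 1).foldl
      (fun m i => PySem.List.pySetD m (PySem.List.len m - 1 - i)
        (PySem.List.pyGetD dv ((kk : Int) - 1 - i) []))
      (List.replicate 36 (List.replicate 4 (0 : Int)))
    = (List.range 36).map (fun p =>
        if 72 - j ≤ p then dv.getD (kk + p - 72) []
        else if 36 - j ≤ p then dv.getD (kk + p - 36) []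
        else List.replicate 4 (0:Int)) := by
  induction j with
  | zero =>
    rw [PySem.List.pyRange_one_eq_nil (by norm_num), List.foldl_nil]
    rw [show ((List.range 36).map (fun p =>
        if 72 - 0 ≤ p then dv.getD (kk + p - 72) []
        else if 36 - 0 ≤ p then dv.getD (kk + p - 36) []
        else List.replicate 4 (0:Int)))
      = (List.range 36).map (fun _ => List.replicate 4 (0:Int)) from
        List.map_congr_left (fun p hp => by
          have : p < 36 := by simpa using hp
          rw [if_neg (by omega), if_neg (by omega)])]
    simp
  | succ j ih =>
    have hj' : j ≤ kk := by omega
    have hcast : ((j+1 : Nat) : Int) = (j : Int) + 1 := by push_cast; ring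
    rw [hcast, PySem.List.pyRange_one_succ_right (by positivity), List.foldl_append, ih hj']
    simp only [List.foldl_cons, List.foldl_nil]
    have hlen36 : PySem.List.len ((List.range 36).map (fun p =>
        if 72 - j ≤ p then dv.getD (kk + p - 72) []
        else if 36 - j ≤ p then dv.getD (kk + p - 36) []
        else List.replicate 4 (0:Int))) = (36 : Int) := by
      rw [PySem.List.len_eq]; simp
    rw [hlen36]
    have hidx2 : (kk : Int) - 1 - (j : Int) = ((kk - 1 - j : Nat) : Int) := by omega
    rw [hidx2, PySem.List.pyGetD_natCast]
    by_cases hsmall : j ≤ 35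
    · have hidx : (36 : Int) - 1 - (j : Int) = ((35 - j : Nat) : Int) := by push_cast; omega
      rw [hidx, PySem.List.pySetD_natCast, pvSetMapRange _ 36 (35-j) _]
      apply List.map_congr_left
      intro p hp
      have hp36 : p < 36 := by simpa using hp
      split_ifs <;> first | rfl | omega | (congr 1; omega)
    · have hbig : 36 ≤ j := by omega
      have hj71 : j ≤ 71 := by omega
      have hidx : (36 : Int) - 1 - (j : Int) = -(((j - 35 : Nat) : Int)) := by push_cast; omega
      rw [hidx, pvSetD_neg _ (j-35) _ (by omega) (by simp; omega)]
      rw [show ((List.range 36).map (fun p =>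
          if 72 - j ≤ p then dv.getD (kk + p - 72) []
          else if 36 - j ≤ p then dv.getD (kk + p - 36) []
          else List.replicate 4 (0:Int))).length = 36 by simp]
      rw [show 36 - (j - 35) = 71 - j by omega, pvSetMapRange _ 36 (71-j) _]
      apply List.map_congr_left
      intro p hp
      have hp36 : p < 36 := by simpa using hp
      split_ifs <;> first | rfl | omega | (congr 1; omega)

lemma pvColBig (cs : List Char) (k : Nat) (h37 : 37 ≤ k) (jn : Nat) (hj : jn < 4) :
    ((List.range 36).map (fun p =>
        if 72 - k ≤ p then (pvRowsS cs k).getD (k + p - 72) []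
        else (pvRowsS cs k).getD (k + p - 36) [])).map (fun row => PySem.List.pyGetD row ((jn : Nat) : Int) 0)
      = (List.range 36).map (fun p =>
          pvVal cs (4 * (if 72 - k ≤ p then k + p - 72 else k + p - 36) + jn)) := by
  rw [List.map_map]
  apply List.map_congr_left
  intro p hp
  have hp36 : p < 36 := by simpa using hp
  simp only [Function.comp]
  split_ifs with h1
  · rw [pvRowsS_getD cs k _ (by omega), PySem.List.pyGetD_natCast, pvGetDmapRange4 _ jn hj]
  · rw [pvRowsS_getD cs k _ (by omega), PySem.List.pyGetD_natCast, pvGetDmapRange4 _ jn hj]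

lemma pvA_big (iv : String)
    (heven : iv.toList.length % 2 = 0)
    (h37 : 37 ≤ iv.toList.length / 8) (h72 : iv.toList.length / 8 ≤ 72) :
    initialState384and512 iv
      = (List.range 4).map (fun jn => (List.range 36).map (fun p =>
          pvVal iv.toList
            (4 * (if 72 - iv.toList.length / 8 ≤ p
                  then iv.toList.length / 8 + p - 72
                  else iv.toList.length / 8 + p - 36) + jn))) := by
  set cs := iv.toList with hcs
  set k := cs.length / 8 with hkdef
  rw [show initialState384and512 iv = pvTransposeMatrix
        ((PySem.List.pyRange 0 (PySem.List.len (pvHexToDec cs)) 1).foldl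
          (fun m i => PySem.List.pySetD m (PySem.List.len m - 1 - i)
            (PySem.List.pyGetD (pvHexToDec cs) (PySem.List.len (pvHexToDec cs) - 1 - i) []))
          ((PySem.List.pyRange 0 36 1).foldl (fun m _ => m ++ [List.replicate 4 (0 : Int)]) []))
      from rfl]
  rw [pvM0_eq, pvHexToDec_eq cs heven, ← hkdef]
  have hlenrows : (pvRowsS cs k).length = k := by simp [pvRowsS]
  have hlenI : PySem.List.len (pvRowsS cs k) = ((k : Nat) : Int) := by
    rw [PySem.List.len_eq, hlenrows]
  rw [hlenI, pvWrapLoop (pvRowsS cs k) k (by omega) (by omega) k (by omega)]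
  have hentry : ∀ p, p < 36 →
      (if 72 - k ≤ p then (pvRowsS cs k).getD (k + p - 72) []
       else if 36 - k ≤ p then (pvRowsS cs k).getD (k + p - 36) []
       else List.replicate 4 (0:Int))
      = (if 72 - k ≤ p then (pvRowsS cs k).getD (k + p - 72) []
         else (pvRowsS cs k).getD (k + p - 36) []) := by
    intro p hp
    split_ifs with h1 h2 <;> first | rfl | omega
  set m := (List.range 36).map (fun p =>
      if 72 - k ≤ p then (pvRowsS cs k).getD (k + p - 72) []
      else if 36 - k ≤ p then (pvRowsS cs k).getD (k + p - 36) []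
      else List.replicate 4 (0:Int)) with hm
  have h0 : (PySem.List.pyGetD m 0 []).length = 4 := by
    rw [PySem.List.pyGetD_zero, hm,
        List.getD_eq_getElem _ _ (by simp)]
    simp only [List.getElem_map, List.getElem_range]
    rw [hentry 0 (by omega)]
    split_ifs
    · rw [pvRowsS_getD cs k _ (by omega)]; simp
    · rw [pvRowsS_getD cs k _ (by omega)]; simp
  rw [pvTranspose_eq m h0]
  have hmrw : ∀ (i : Int), m.map (fun row => PySem.List.pyGetD row i 0)
      = ((List.range 36).map (fun p =>
          if 72 - k ≤ p then (pvRowsS cs k).getD (k + p - 72) []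
          else (pvRowsS cs k).getD (k + p - 36) [])).map (fun row => PySem.List.pyGetD row i 0) := by
    intro i
    rw [hm]
    congr 1
    exact List.map_congr_left (fun p hp => hentry p (by simpa using hp))
  rw [show PySem.List.pyRange 0 4 1 = [((0:Nat):Int), ((1:Nat):Int), ((2:Nat):Int), ((3:Nat):Int)] from rfl,
      show List.range 4 = [0,1,2,3] from rfl]
  simp only [List.map_cons, List.map_nil]
  rw [hmrw, hmrw, hmrw, hmrw,
      pvColBig cs k h37 0 (by norm_num), pvColBig cs k h37 1 (by norm_num),
      pvColBig cs k h37 2 (by norm_num), pvColBig cs k h37 3 (by norm_num)]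

def pvF (cs : List Char) (g : Nat) : List Int :=
  (List.range 4).map (fun j =>
    (PySem.Int.ofCharsBase?
      (PySem.List.slice cs (some ((8 * g + 2 * j : Nat) : Int)) (some ((8 * g + 2 * j + 2 : Nat) : Int)))
      16).getD 0)

lemma pvB_big (iv : String) (h36 : 36 ≤ iv.toList.length / 8) :
    initialState384and512_alt iv
      = (List.range 4).map (fun jn => (List.range 36).map (fun p =>
          pvVal iv.toList (4 * (iv.toList.length / 8 + p - 36) + jn))) := by
  have hshape : initialState384and512_alt iv = (List.range 4).map (fun jn =>
      List.replicate (36 - (((List.range (iv.toList.length / 8)).map (pvF iv.toList)).drop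
          (iv.toList.length / 8 - 36)).length) (0 : Int)
        ++ (((List.range (iv.toList.length / 8)).map (pvF iv.toList)).drop
          (iv.toList.length / 8 - 36)).map (fun row => PySem.List.pyGetD row ((jn : Nat) : Int) 0)) := rfl
  rw [hshape]
  set cs := iv.toList with hcs
  set k := cs.length / 8 with hkdef
  have htail : ((List.range k).map (pvF cs)).drop (k - 36)
      = (List.range 36).map (fun p => pvF cs (k - 36 + p)) := by
    rw [← List.map_drop,
        show (List.range k).drop (k - 36) = List.range' (k-36) (k - (k-36)) by
          simp [List.range_eq_range', List.drop_range'],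
        show k - (k - 36) = 36 by omega,
        List.range'_eq_map_range, List.map_map]
    rfl
  rw [htail]
  have hlen : ((List.range 36).map (fun p => pvF cs (k - 36 + p))).length = 36 := by simp
  rw [hlen]
  apply List.map_congr_left
  intro jn hjn
  have hj4 : jn < 4 := by simpa using hjn
  rw [show (36 - 36 : Nat) = 0 by omega, List.replicate_zero, List.nil_append, List.map_map]
  apply List.map_congr_left
  intro p hp
  have hp36 : p < 36 := by simpa using hp
  simp only [Function.comp, pvF]
  rw [PySem.List.pyGetD_natCast, pvGetDmapRange4 _ jn hj4,
      pvSliceVal cs (k - 36 + p) jn (by omega)]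
  congr 1
  omega

theorem pvMain (iv : String)
    (heven : iv.toList.length % 2 = 0)
    (hk36 : iv.toList.length / 8 ≤ 36) :
    initialState384and512 iv = initialState384and512_alt iv := by
  set cs := iv.toList with hcs
  set k := cs.length / 8 with hkdef
  rw [show initialState384and512 iv = pvTransposeMatrix
        ((PySem.List.pyRange 0 (PySem.List.len (pvHexToDec cs)) 1).foldl
          (fun m i => PySem.List.pySetD m (PySem.List.len m - 1 - i)
            (PySem.List.pyGetD (pvHexToDec cs) (PySem.List.len (pvHexToDec cs) - 1 - i) []))
          ((PySem.List.pyRange 0 36 1).foldl (fun m _ => m ++ [List.replicate 4 (0 : Int)]) []))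
      from rfl]
  rw [pvM0_eq, pvHexToDec_eq cs heven]
  rw [← hkdef]
  have hlenrows : (pvRowsS cs k).length = k := by simp [pvRowsS]
  rw [pvUpdateFull (pvRowsS cs k) (by omega), hlenrows]
  set m := List.replicate (36-k) (List.replicate 4 (0:Int)) ++ pvRowsS cs k with hm
  have hmlen : m.length = 36 := by
    rw [hm]; simp [hlenrows]; omega
  have hmem4 : ∀ r ∈ m, r.length = 4 := by
    intro r hr
    rcases List.mem_append.1 hr with h | h
    · rw [List.eq_of_mem_replicate h]; simp
    · obtain ⟨g, _, rfl⟩ := List.mem_map.1 h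
      simp
  have h0 : (PySem.List.pyGetD m 0 []).length = 4 := by
    rw [PySem.List.pyGetD_zero, List.getD_eq_getElem _ _ (by omega)]
    exact hmem4 _ (List.getElem_mem _)
  rw [pvTranspose_eq m h0, pvAlt_eq iv hk36]
  rw [show PySem.List.pyRange 0 4 1 = [((0:Nat):Int), ((1:Nat):Int), ((2:Nat):Int), ((3:Nat):Int)] from rfl,
      show List.range 4 = [0,1,2,3] from rfl]
  simp only [List.map_cons, List.map_nil]
  rw [pvCol cs k 0 (by norm_num), pvCol cs k 1 (by norm_num),
      pvCol cs k 2 (by norm_num), pvCol cs k 3 (by norm_num)]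

-- ===== VERDICT (by name: the statement is the Claim_ definition above) =====
theorem initialState384and512_spec : Claim_unchanged_initialState384and512 := by
  intro iv _ hpre hnd
  obtain ⟨heven, hk72, hsome⟩ := hpre
  by_cases h36 : iv.toList.length / 8 ≤ 36
  · exact pvMain iv heven h36
  · have h37 : 37 ≤ iv.toList.length / 8 := by omega
    have hall : ∀ p ∈ List.range (4 * (iv.toList.length / 8 - 36)),
        PySem.Int.ofCharsBase? [iv.toList.getD (2 * p) ' ', iv.toList.getD (2 * p + 1) ' '] 16
          = PySem.Int.ofCharsBase? [iv.toList.getD (2 * (p + 144)) ' ', iv.toList.getD (2 * (p + 144) + 1) ' '] 16 := by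
      intro p hpmem
      by_contra hneq
      exact hnd ⟨h37, hk72, p, hpmem, hneq⟩
    rw [pvA_big iv heven h37 hk72, pvB_big iv (by omega)]
    apply List.map_congr_left
    intro jn hjn
    have hj4 : jn < 4 := by simpa using hjn
    apply List.map_congr_left
    intro p hp
    have hp36 : p < 36 := by simpa using hp
    split_ifs with hc
    · set k := iv.toList.length / 8 with hkdef
      have heqopt := hall (4 * (k + p - 72) + jn) (by
        rw [List.mem_range]; omega)
      rw [show 4 * (k + p - 36) + jn = (4 * (k + p - 72) + jn) + 144 by omega]
      simp only [pvVal, pvPair]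
      rw [heqopt]
    · rfl

set_option maxRecDepth 100000 in
theorem initialState384and512_changed : Claim_changed_initialState384and512 := by
  unfold Claim_changed_initialState384and512; decide

theorem initialState384and512_tight : Claim_exact_initialState384and512 := by
  intro iv _ hpre hD heq
  obtain ⟨heven, hk72, hsome⟩ := hpre
  obtain ⟨h37, _, q, hqmem, hne⟩ := hD
  set k := iv.toList.length / 8 with hkdef
  have hq : q < 4 * (k - 36) := by simpa using hqmem
  rw [pvA_big iv heven h37 hk72, pvB_big iv (by omega)] at heq
  set jn := q % 4 with hjn
  set g := q / 4 with hg
  set p := g + 72 - k with hp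
  have hj4 : jn < 4 := by omega
  have hp36 : p < 36 := by omega
  have hgetD : ∀ {α : Type} (d : α) (i : Nat) (L M : List α), L = M → L.getD i d = M.getD i d := by
    intro α d i L M h; rw [h]
  have hrow := hgetD [] jn _ _ heq
  rw [pvGetDmapRange _ _ _ _ hj4, pvGetDmapRange _ _ _ _ hj4] at hrow
  have hval := hgetD 0 p _ _ hrow
  rw [pvGetDmapRange _ _ _ _ hp36, pvGetDmapRange _ _ _ _ hp36] at hval
  rw [if_pos (show 72 - k ≤ p by omega)] at hval
  rw [show 4 * (k + p - 72) + jn = q by omega,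
      show 4 * (k + p - 36) + jn = q + 144 by omega] at hval
  have hs1 := hsome q (by rw [List.mem_range]; omega)
  have hs2 := hsome (q + 144) (by rw [List.mem_range]; omega)
  obtain ⟨a, ha⟩ := Option.isSome_iff_exists.mp hs1
  obtain ⟨b, hb⟩ := Option.isSome_iff_exists.mp hs2
  apply hne
  simp only [pvVal, pvPair] at hval
  rw [ha, hb]
  rw [ha, hb] at hval
  simp only [Option.getD_some] at hval
  rw [hval]
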